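-- pv_equiv track=rewrite | github.com/fanck0605/ACL4SSR | Clash/update_nameserver_policy.py | get_domain_sld
-- ===== SOURCE A (Python) =====
-- def get_domain_sld(domain: str, tlds: set[str]) -> str:
--     # get second level domain from a domain, if domain is not valid, raise
--     domain_parts = domain.split(".")
--     domain_len = len(domain_parts)
--     for start in range(0, domain_len):
--         root_domain = ".".join(domain_parts[start + 1 :])
--         if root_domain in tlds:
--             return f"{domain_parts[start]}.{root_domain}"
--     raise ValueError(f"{domain} not found in tlds")
-- ===== SOURCE B (Python) =====
-- def get_domain_sld(domain: str, tlds: set[str]) -> str: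
--     # Single bottom-up pass: grow the candidate suffix label by label from the
--     # right, keeping the last (= longest) suffix found in tlds.
--     best = None
--     suffix = None  # None = no labels consumed yet (candidate is the empty suffix)
--     for part in reversed(domain.split(".")):
--         cand = suffix if suffix is not None else ""
--         if cand in tlds:
--             best = f"{part}.{cand}"
--         suffix = part if suffix is None else f"{part}.{suffix}"
--     if best is None:
--         raise ValueError(f"{domain} not found in tlds")
--     return best
-- ===== Notes on version B (the rewrite author's own statement) =====
-- stated objective: alternative
-- what changed: A scans top-down with an early return, re-slicing and re-joining the remaining labels on every iteration; B does one bottom-up pass that grows the candidate suffix incrementally label by label and keeps the last (longest) suffix found in tlds.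
import Mathlib
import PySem

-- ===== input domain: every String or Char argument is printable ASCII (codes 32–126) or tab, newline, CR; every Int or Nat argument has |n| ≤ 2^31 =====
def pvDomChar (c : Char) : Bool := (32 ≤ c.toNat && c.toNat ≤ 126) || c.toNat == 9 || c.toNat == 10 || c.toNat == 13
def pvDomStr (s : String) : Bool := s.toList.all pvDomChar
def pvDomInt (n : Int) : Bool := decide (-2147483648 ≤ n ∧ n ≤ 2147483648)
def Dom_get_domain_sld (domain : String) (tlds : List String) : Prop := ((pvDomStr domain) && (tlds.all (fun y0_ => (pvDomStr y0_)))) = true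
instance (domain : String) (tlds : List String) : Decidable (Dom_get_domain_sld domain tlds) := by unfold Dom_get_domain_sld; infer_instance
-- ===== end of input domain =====

-- B replaces A's top-down scan (re-joining a slice of the parts per iteration, first match
-- returns) by a single bottom-up pass growing the suffix incrementally and keeping the last
-- match (objective: alternative decomposition; avoids the repeated slice-and-join work).

-- ===== PORT A =====
-- domain.split("."): the separator "." is nonempty, so PySem.Str.split? is always some and the
-- getD [] fallback is never taken (exact).
-- 'for start in range(0, domain_len): … return …' as recursion over the index list
def pvALoop (parts : List String) (tlds : List String) : List Int → String
  | [] => ""   -- Python: raise ValueError(f"{domain} not found in tlds") — excluded by Pre_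
  | start :: rest =>
      let root_domain := PySem.Str.join "." (PySem.List.slice parts (some (start + 1)) none)
      if root_domain ∈ tlds then PySem.List.pyGetD parts start "" ++ "." ++ root_domain
      else pvALoop parts tlds rest

def get_domain_sld (domain : String) (tlds : List String) : String :=
  let domain_parts := ((PySem.Str.split? domain ".").getD [])
  let domain_len := domain_parts.length
  pvALoop domain_parts tlds (PySem.List.pyRange 0 domain_len 1)

-- ===== PORT B =====
-- one loop iteration of Source B: state = (best, suffix); suffix = none means no labels consumed yet
def pvBStep (tlds : List String) (st : Option String × Option String) (part : String) : Option String × Option String :=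
  let cand := match st.2 with | none => "" | some s => s
  let best := if cand ∈ tlds then some (part ++ "." ++ cand) else st.1
  let suffix := match st.2 with | none => part | some s => part ++ "." ++ s
  (best, some suffix)

def get_domain_sld_alt (domain : String) (tlds : List String) : String :=
  let st := ((((PySem.Str.split? domain ".").getD [])).reverse).foldl (pvBStep tlds) (none, none)
  st.1.getD ""   -- Python: if best is None: raise ValueError — excluded by Pre_

-- ===== PRECONDITION & SPEC =====
-- Pre_ holds exactly when some dot-suffix of the split domain (possibly the empty one) is in
-- tlds; otherwise the Python A (and B) raises ValueError.
def Pre_get_domain_sld (domain : String) (tlds : List String) : Prop :=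
  ∃ s ∈ List.range (((PySem.Str.split? domain ".").getD [])).length,
    PySem.Str.join "." ((((PySem.Str.split? domain ".").getD [])).drop (s + 1)) ∈ tlds
instance (domain : String) (tlds : List String) : Decidable (Pre_get_domain_sld domain tlds) := by unfold Pre_get_domain_sld; infer_instance

def pvWitness_get_domain_sld : String × List String := ("www.example.com", ["com", "co.uk"])

def Spec_get_domain_sld (domain : String) (tlds : List String) (out : String) : Prop := out = get_domain_sld_alt domain tlds
instance (domain : String) (tlds : List String) (out : String) : Decidable (Spec_get_domain_sld domain tlds out) := by unfold Spec_get_domain_sld; infer_instance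

-- ===== CLAIM (what is proved, stated in full; the proofs are below) =====
def Claim_equal_get_domain_sld : Prop := ∀ (domain : String) (tlds : List String), Dom_get_domain_sld domain tlds → Pre_get_domain_sld domain tlds → Spec_get_domain_sld domain tlds (get_domain_sld domain tlds)

-- ===== LEMMAS AND PROOFS =====

-- common characterisation: the first index whose dot-joined proper suffix is in tlds
def pvFirstMatch (tlds : List String) : List String → Option String
  | [] => none
  | p :: rest =>
      if PySem.Str.join "." rest ∈ tlds then some (p ++ "." ++ PySem.Str.join "." rest)
      else pvFirstMatch tlds rest

theorem pvJoin_nil : PySem.Str.join "." ([] : List String) = "" := by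
  apply String.toList_inj.mp
  simp [PySem.Str.toList_join, PySem.Chars.join_nil]

theorem pvJoin_singleton (p : String) : PySem.Str.join "." [p] = p := by
  apply String.toList_inj.mp
  simp [PySem.Str.toList_join, PySem.Chars.join_singleton]

theorem pvJoin_cons_cons (p q : String) (rest : List String) :
    PySem.Str.join "." (p :: q :: rest) = p ++ "." ++ PySem.Str.join "." (q :: rest) := by
  apply String.toList_inj.mp
  simp [PySem.Str.toList_join, PySem.Chars.join_cons_cons]

theorem pvB_foldr (tlds : List String) (parts : List String) :
    parts.foldr (fun p st => pvBStep tlds st p) (none, none)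
      = (pvFirstMatch tlds parts,
         if parts.isEmpty then none else some (PySem.Str.join "." parts)) := by
  induction parts with
  | nil => rfl
  | cons p rest ih =>
      rw [List.foldr_cons, ih]
      cases rest with
      | nil => simp [pvBStep, pvFirstMatch, pvJoin_nil, pvJoin_singleton]
      | cons q rest' => simp [pvBStep, pvFirstMatch, pvJoin_cons_cons]

theorem pvA_loop (parts tlds : List String) (k : Nat) :
    pvALoop parts tlds (PySem.List.pyRange (k : Int) (parts.length : Int))
      = (pvFirstMatch tlds (parts.drop k)).getD "" := by
  by_cases hk : k < parts.length
  · rw [PySem.List.pyRange_one_cons (by exact_mod_cast hk), pvALoop]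
    have hnext : ((k : Int) + 1) = (((k + 1 : Nat)) : Int) := by push_cast; ring
    have hsl : PySem.List.slice parts (some (((k + 1 : Nat)) : Int)) none = parts.drop (k + 1) :=
      PySem.List.slice_from_natCast parts (k + 1)
    have hget : PySem.List.pyGetD parts (k : Int) "" = parts[k] := by
      rw [PySem.List.pyGetD_natCast]
      simp [List.getD_eq_getElem?_getD, hk]
    rw [List.drop_eq_getElem_cons hk, pvFirstMatch]
    simp only [hnext, hsl, hget]
    split_ifs with h
    · simp
    · rw [pvA_loop parts tlds (k + 1)]
  · have hempty : PySem.List.pyRange (k : Int) (parts.length : Int) = [] := by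
      rw [PySem.List.pyRange_of_pos (k : Int) (parts.length : Int) (by norm_num)]
      have : ¬ ((k : Int) < (parts.length : Int)) := by exact_mod_cast hk
      simp [this]
    rw [hempty, List.drop_eq_nil_of_le (by omega)]
    rfl
termination_by parts.length - k

theorem pv_ports_agree (domain : String) (tlds : List String) :
    get_domain_sld domain tlds = get_domain_sld_alt domain tlds := by
  unfold get_domain_sld get_domain_sld_alt
  rw [List.foldl_reverse, pvB_foldr]
  have h0 : (0 : Int) = ((0 : Nat) : Int) := rfl
  rw [h0, pvA_loop]
  simp

-- ===== VERDICT (by name: the statement is the Claim_ definition above) =====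
theorem get_domain_sld_spec : Claim_equal_get_domain_sld := by
  intro domain tlds _ _
  unfold Spec_get_domain_sld
  exact pv_ports_agree domain tlds
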